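-- pv_equiv track=rewrite | github.com/nperminov2001-a11y/rain-bot | rainbot.py | format_periods
-- ===== SOURCE A (Python) =====
-- def format_periods(hours, codes, target_codes):
--     periods = []
--     start = None
--     for i, (hour, code) in enumerate(zip(hours, codes)):
--         if code in target_codes:
--             if start is None:
--                 start = hour
--             end = hour
--         else:
--             if start is not None:
--                 periods.append(f"с {start} до {end}")
--                 start = None
--     if start is not None:
--         periods.append(f"с {start} до {end}")
--     return ", ".join(periods) if periods else None
-- ===== SOURCE B (Python) =====
-- def format_periods(hours, codes, target_codes):
--     # Run-based scan over a set of target codes: find each maximal run of matching codes with an inner scan,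
--     # format it once from its first and last hour (no start/end state machine).
--     pairs = list(zip(hours, codes))
--     targets = set(target_codes)
--     n = len(pairs)
--     periods = []
--     i = 0
--     while i < n:
--         h, c = pairs[i]
--         i += 1
--         if c in targets:
--             j = i
--             while j < n and pairs[j][1] in targets:
--                 j += 1
--             periods.append(f"с {h} до {pairs[j - 1][0]}")
--             i = j
--     return ", ".join(periods) if periods else None
-- ===== Notes on version B (the rewrite author's own statement) =====
-- stated objective: faster
-- what changed: Replaces A's start/end state machine (with a linear 'code in target_codes' list scan per element) by a run decomposition over a precomputed set of target codes: an outer scan finds the first hour of each maximal matching run, an inner scan finds its last hour, and each run is formatted in one step.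
import Mathlib
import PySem

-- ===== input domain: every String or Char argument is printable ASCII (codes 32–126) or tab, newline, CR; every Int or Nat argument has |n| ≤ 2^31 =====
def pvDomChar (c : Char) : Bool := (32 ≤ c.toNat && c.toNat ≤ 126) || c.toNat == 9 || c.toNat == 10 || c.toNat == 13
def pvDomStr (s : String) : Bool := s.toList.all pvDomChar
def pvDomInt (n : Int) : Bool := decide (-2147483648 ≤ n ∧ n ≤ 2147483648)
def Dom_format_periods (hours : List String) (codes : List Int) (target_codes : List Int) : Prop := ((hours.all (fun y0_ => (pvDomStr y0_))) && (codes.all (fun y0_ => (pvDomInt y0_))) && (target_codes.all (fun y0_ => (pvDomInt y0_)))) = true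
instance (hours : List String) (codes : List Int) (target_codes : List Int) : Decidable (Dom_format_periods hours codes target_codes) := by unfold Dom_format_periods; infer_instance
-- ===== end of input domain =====

-- B replaces A's start/end state machine by a run decomposition (format each maximal
-- matching run from its first and last hour) over a set of the target codes,
-- removing A's per-element list scan (measured faster in a timing run).


-- ===== PORT A =====
-- loop body of A: state = (periods, start, end); end starts as "" (Python never reads it before setting)
def pvStepA (target_codes : List Int) (st : List String × Option String × String) (hc : String × Int) : List String × Option String × String :=
  if hc.2 ∈ target_codes then
    (st.1, (match st.2.1 with | none => some hc.1 | some s => some s), hc.1)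
  else
    match st.2.1 with
    | some s => (st.1 ++ ["с " ++ s ++ " до " ++ st.2.2], none, st.2.2)
    | none => st

-- trailing flush after the loop
def pvFinishA (st : List String × Option String × String) : List String :=
  match st.2.1 with
  | some s => st.1 ++ ["с " ++ s ++ " до " ++ st.2.2]
  | none => st.1

def format_periods (hours : List String) (codes : List Int) (target_codes : List Int) : Option String :=
  let periods := pvFinishA ((hours.zip codes).foldl (pvStepA target_codes) ([], none, ""))
  if periods = [] then none else some (String.intercalate ", " periods)

-- ===== PORT B =====
-- outer scan over the zipped pairs; the inner `while ... j += 1` scan is ported as List.span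
def pvRuns (target_codes : List Int) : List (String × Int) → List String
  | [] => []
  | (h, c) :: rest =>
    if c ∈ target_codes then
      let sp := rest.span (fun p => decide (p.2 ∈ target_codes))
      ("с " ++ h ++ " до " ++ (sp.1.map Prod.fst).getLastD h) :: pvRuns target_codes sp.2
    else
      pvRuns target_codes rest
termination_by l => l.length
decreasing_by
  · simp only [List.span_eq_takeWhile_dropWhile]
    exact Nat.lt_succ_of_le (List.length_dropWhile_le _ _)
  · exact Nat.lt_succ_self _

def format_periods_alt (hours : List String) (codes : List Int) (target_codes : List Int) : Option String :=
  let periods := pvRuns (PySem.Set.ofList target_codes) (hours.zip codes)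
  if periods = [] then none else some (String.intercalate ", " periods)

-- ===== PRECONDITION & SPEC =====
def Spec_format_periods (hours : List String) (codes : List Int) (target_codes : List Int) (out : Option String) : Prop := out = format_periods_alt hours codes target_codes
instance (hours : List String) (codes : List Int) (target_codes : List Int) (out : Option String) : Decidable (Spec_format_periods hours codes target_codes out) := by unfold Spec_format_periods; infer_instance

-- ===== CLAIM (what is proved, stated in full; the proofs are below) =====
def Claim_equal_format_periods : Prop := ∀ (hours : List String) (codes : List Int) (target_codes : List Int), Dom_format_periods hours codes target_codes → Spec_format_periods hours codes target_codes (format_periods hours codes target_codes)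

-- ===== LEMMAS AND PROOFS =====

-- Core invariant, both loop states at once:
-- from start = none the flushed fold produces exactly the runs of L;
-- from start = some s (current run started at s, last matching hour e) it produces
-- the completed current run followed by the runs of the unmatched remainder.
theorem pvFold_inv (tc : List Int) (L : List (String × Int)) :
    (∀ p e, pvFinishA (L.foldl (pvStepA tc) (p, none, e)) = p ++ pvRuns tc L) ∧
    (∀ p s e, pvFinishA (L.foldl (pvStepA tc) (p, some s, e)) =
      p ++ (("с " ++ s ++ " до " ++
        ((L.takeWhile (fun q => decide (q.2 ∈ tc))).map Prod.fst).getLastD e) ::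
        pvRuns tc (L.dropWhile (fun q => decide (q.2 ∈ tc))))) := by
  induction L with
  | nil =>
    constructor
    · intro p e; simp [pvFinishA, pvRuns]
    · intro p s e; simp [pvFinishA, pvRuns]
  | cons hc rest ih =>
    obtain ⟨h, c⟩ := hc
    constructor
    · intro p e
      by_cases hm : c ∈ tc
      · have hT : List.takeWhile (fun q => decide (q.2 ∈ tc)) ((h, c) :: rest)
            = (h, c) :: List.takeWhile (fun q => decide (q.2 ∈ tc)) rest := by
          simp [hm]
        have hD : List.dropWhile (fun q => decide (q.2 ∈ tc)) ((h, c) :: rest)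
            = List.dropWhile (fun q => decide (q.2 ∈ tc)) rest := by
          simp [hm]
        simp only [List.foldl_cons, pvStepA, if_pos hm]
        rw [ih.2 p h h, pvRuns, if_pos hm]
        simp only [List.span_eq_takeWhile_dropWhile]
      · simp only [List.foldl_cons, pvStepA, if_neg hm]
        rw [ih.1 p e, pvRuns, if_neg hm]
    · intro p s e
      by_cases hm : c ∈ tc
      · have hT : List.takeWhile (fun q => decide (q.2 ∈ tc)) ((h, c) :: rest)
            = (h, c) :: List.takeWhile (fun q => decide (q.2 ∈ tc)) rest := by
          simp [hm]
        have hD : List.dropWhile (fun q => decide (q.2 ∈ tc)) ((h, c) :: rest)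
            = List.dropWhile (fun q => decide (q.2 ∈ tc)) rest := by
          simp [hm]
        simp only [List.foldl_cons, pvStepA, if_pos hm]
        rw [ih.2 p s h, hT, hD, List.map_cons, List.getLastD_cons]
      · have hT : List.takeWhile (fun q => decide (q.2 ∈ tc)) ((h, c) :: rest) = [] := by
          simp [hm]
        have hD : List.dropWhile (fun q => decide (q.2 ∈ tc)) ((h, c) :: rest)
            = (h, c) :: rest := by
          simp [hm]
        simp only [List.foldl_cons, pvStepA, if_neg hm]
        rw [ih.1 (p ++ ["с " ++ s ++ " до " ++ e]) e, hT, hD]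
        simp [pvRuns, hm]

-- pvRuns only depends on target membership, so the set(target_codes) in B changes nothing
theorem pvRuns_congr (tc tc' : List Int) (hiff : ∀ x, x ∈ tc ↔ x ∈ tc') :
    ∀ L : List (String × Int), pvRuns tc L = pvRuns tc' L
  | [] => by simp [pvRuns]
  | (h, c) :: rest => by
      have hp : (fun q : String × Int => decide (q.2 ∈ tc)) = (fun q => decide (q.2 ∈ tc')) :=
        funext fun q => decide_eq_decide.mpr (hiff q.2)
      by_cases hm : c ∈ tc
      · rw [pvRuns, pvRuns, if_pos hm, if_pos ((hiff c).mp hm)]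
        simp only [List.span_eq_takeWhile_dropWhile, hp]
        rw [pvRuns_congr tc tc' hiff (List.dropWhile (fun q => decide (q.2 ∈ tc')) rest)]
      · rw [pvRuns, pvRuns, if_neg hm, if_neg (fun h' => hm ((hiff c).mpr h'))]
        exact pvRuns_congr tc tc' hiff rest
  termination_by L => L.length
  decreasing_by
  · exact Nat.lt_succ_of_le (List.length_dropWhile_le _ _)
  · exact Nat.lt_succ_self _

theorem pvPeriods_eq (tc : List Int) (L : List (String × Int)) :
    pvFinishA (L.foldl (pvStepA tc) ([], none, "")) = pvRuns tc L :=
  (pvFold_inv tc L).1 [] ""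

-- ===== VERDICT (by name: the statement is the Claim_ definition above) =====
theorem format_periods_spec : Claim_equal_format_periods := by
  intro hours codes target_codes _
  unfold Spec_format_periods format_periods format_periods_alt
  rw [pvPeriods_eq, pvRuns_congr target_codes (PySem.Set.ofList target_codes)
    (fun x => Iff.symm (PySem.Set.mem_ofList target_codes x))]
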